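-- pv_equiv track=rewrite | github.com/samodostal/AOC | 2023/16/16.py | simulate_beam
-- ===== SOURCE A (Python) =====
-- def reflect_speed(reflection, speed):
--     reflected_speed = ()
--
--     match speed:
--         case (0, 1):  # Right
--             reflected_speed = (-1, 0) if reflection == "/" else (1, 0)
--         case (0, -1):  # Left
--             reflected_speed = (1, 0) if reflection == "/" else (-1, 0)
--         case (1, 0):  # Down
--             reflected_speed = (0, -1) if reflection == "/" else (0, 1)
--         case (-1, 0):  # Up
--             reflected_speed = (0, 1) if reflection == "/" else (0, -1)
--         case _:
--             assert False
--
--     return reflected_speed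
--
-- def split_speeds(splitter, speed):
--     split_speeds = []
--
--     match speed:
--         case (0, 1):  # Right
--             split_speeds = [(1, 0), (-1, 0)] if splitter == "|" else [speed]
--         case (0, -1):  # Left
--             split_speeds = [(-1, 0), (1, 0)] if splitter == "|" else [speed]
--         case (1, 0):  # Down
--             split_speeds = [(0, -1), (0, 1)] if splitter == "-" else [speed]
--         case (-1, 0):  # Up
--             split_speeds = [(0, 1), (0, -1)] if splitter == "-" else [speed]
--         case _:
--             assert False
--
--     return split_speeds
--
-- def simulate_beam(beam, map):
--     pos_row, pos_col, speed_row, speed_col = beam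
--
--     next_beams = []
--     tile = map[pos_row][pos_col]
--
--     match tile:
--         case ".":
--             next_beams.append(
--                 (pos_row + speed_row, pos_col + speed_col, speed_row, speed_col)
--             )
--         case "/" | "L":
--             reflected_speed_row, reflected_speed_col = reflect_speed(
--                 tile, (speed_row, speed_col)
--             )
--             next_beams.append(
--                 (
--                     pos_row + reflected_speed_row,
--                     pos_col + reflected_speed_col,
--                     reflected_speed_row,
--                     reflected_speed_col,
--                 )
--             )
--         case "|" | "-":
--             speeds = split_speeds(tile, (speed_row, speed_col))
--             for split_speed in speeds:
--                 next_beams.append(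
--                     (
--                         pos_row + split_speed[0],
--                         pos_col + split_speed[1],
--                         split_speed[0],
--                         split_speed[1],
--                     )
--                 )
--
--         case _:
--             assert False
--
--     return next_beams
-- ===== SOURCE B (Python) =====
-- def _turns_into(tile, s, d):
--     if tile == "/":
--         return d == (-s[1], -s[0])
--     if tile == "L":
--         return d == (s[1], s[0])
--     if tile == "|":
--         return s[1] != 0
--     if tile == "-":
--         return s[0] != 0
--     return False
--
-- def _passes(tile, s):
--     return tile == "." or (tile == "|" and s[1] == 0) or (tile == "-" and s[0] == 0)
--
-- def simulate_beam(beam, map):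
--     pos_row, pos_col, speed_row, speed_col = beam
--     tile = map[pos_row][pos_col]
--     assert tile in ".-|/L"
--     s = (speed_row, speed_col)
--     if tile != ".":
--         assert s in ((0, 1), (0, -1), (1, 0), (-1, 0))
--     candidates = ((s[1], -s[0]), (-s[1], s[0]))  # clockwise turn, counterclockwise turn
--     turned = [d for d in candidates if _turns_into(tile, s, d)]
--     straight = [s] if _passes(tile, s) else []
--     return [(pos_row + dr, pos_col + dc, dr, dc) for dr, dc in turned + straight]
-- ===== Notes on version B (the rewrite author's own statement) =====
-- stated objective: alternative
-- what changed: Replaces A's per-direction match/case emission with generate-and-test: B generates the two rotated candidate directions (clockwise/counterclockwise turns of the beam), filters them through a single transmission predicate, and appends the pass-through direction when the tile transmits straight, then maps all surviving directions to next beams uniformly.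
import Mathlib
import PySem

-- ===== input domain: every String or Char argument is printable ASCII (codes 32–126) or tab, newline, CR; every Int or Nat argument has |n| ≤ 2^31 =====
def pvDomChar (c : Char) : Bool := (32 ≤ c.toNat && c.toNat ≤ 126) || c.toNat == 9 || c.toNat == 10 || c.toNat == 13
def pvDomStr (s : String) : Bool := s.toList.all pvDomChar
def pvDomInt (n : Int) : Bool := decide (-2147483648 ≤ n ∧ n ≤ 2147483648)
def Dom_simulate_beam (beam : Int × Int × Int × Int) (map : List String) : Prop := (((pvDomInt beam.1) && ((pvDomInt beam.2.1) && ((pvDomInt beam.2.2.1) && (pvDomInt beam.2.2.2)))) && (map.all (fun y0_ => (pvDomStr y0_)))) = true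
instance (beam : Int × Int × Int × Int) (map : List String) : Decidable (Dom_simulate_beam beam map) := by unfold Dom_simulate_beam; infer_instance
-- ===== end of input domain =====

-- B re-decomposes A as generate-and-test: filter the two rotated candidate directions through a transmission predicate, then append the pass-through case; proved equal wherever A returns (Pre_ excludes the AssertionError/IndexError inputs).

-- ===== PORT A =====
-- assert False is modelled as Option.none (A raises AssertionError there; Pre_ excludes it)
def reflect_speed (reflection : Char) (speed : Int × Int) : Option (Int × Int) :=
  if speed = ((0 : Int), (1 : Int)) then some (if reflection = '/' then (-1, 0) else (1, 0))
  else if speed = ((0 : Int), (-1 : Int)) then some (if reflection = '/' then (1, 0) else (-1, 0))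
  else if speed = ((1 : Int), (0 : Int)) then some (if reflection = '/' then (0, -1) else (0, 1))
  else if speed = ((-1 : Int), (0 : Int)) then some (if reflection = '/' then (0, 1) else (0, -1))
  else none

def split_speeds (splitter : Char) (speed : Int × Int) : Option (List (Int × Int)) :=
  if speed = ((0 : Int), (1 : Int)) then some (if splitter = '|' then [(1, 0), (-1, 0)] else [speed])
  else if speed = ((0 : Int), (-1 : Int)) then some (if splitter = '|' then [(-1, 0), (1, 0)] else [speed])
  else if speed = ((1 : Int), (0 : Int)) then some (if splitter = '-' then [(0, -1), (0, 1)] else [speed])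
  else if speed = ((-1 : Int), (0 : Int)) then some (if splitter = '-' then [(0, 1), (0, -1)] else [speed])
  else none

def simulate_beam (beam : Int × Int × Int × Int) (map : List String) : List (Int × Int × Int × Int) :=
  let pos_row := beam.1
  let pos_col := beam.2.1
  let speed_row := beam.2.2.1
  let speed_col := beam.2.2.2
  match PySem.List.pyGet? map pos_row with
  | none => []   -- IndexError, excluded by Pre_
  | some row =>
    match PySem.Str.pyGet? row pos_col with
    | none => []   -- IndexError, excluded by Pre_
    | some tile =>
      if tile = '.' then
        [(pos_row + speed_row, pos_col + speed_col, speed_row, speed_col)]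
      else if tile = '/' ∨ tile = 'L' then
        match reflect_speed tile (speed_row, speed_col) with
        | none => []   -- AssertionError, excluded by Pre_
        | some rs =>
          [(pos_row + rs.1, pos_col + rs.2, rs.1, rs.2)]
      else if tile = '|' ∨ tile = '-' then
        match split_speeds tile (speed_row, speed_col) with
        | none => []   -- AssertionError, excluded by Pre_
        | some speeds =>
          speeds.foldl (fun acc s => acc ++ [(pos_row + s.1, pos_col + s.2, s.1, s.2)]) []
      else []   -- AssertionError, excluded by Pre_

-- ===== PORT B =====
def turns_into (tile : Char) (s d : Int × Int) : Bool :=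
  if tile = '/' then d == (-s.2, -s.1)
  else if tile = 'L' then d == (s.2, s.1)
  else if tile = '|' then s.2 != 0
  else if tile = '-' then s.1 != 0
  else false

def passes (tile : Char) (s : Int × Int) : Bool :=
  tile == '.' || (tile == '|' && s.2 == 0) || (tile == '-' && s.1 == 0)

def simulate_beam_alt (beam : Int × Int × Int × Int) (map : List String) : List (Int × Int × Int × Int) :=
  let pos_row := beam.1
  let pos_col := beam.2.1
  let speed_row := beam.2.2.1
  let speed_col := beam.2.2.2
  match PySem.List.pyGet? map pos_row with
  | none => []   -- IndexError, excluded by Pre_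
  | some row =>
    match PySem.Str.pyGet? row pos_col with
    | none => []   -- IndexError, excluded by Pre_
    | some tile =>
      if ¬ (tile ∈ ['.', '-', '|', '/', 'L']) then []  -- assert, excluded by Pre_
      else
        let s : Int × Int := (speed_row, speed_col)
        if tile ≠ '.' ∧ ¬ (s ∈ ([((0 : Int), (1 : Int)), (0, -1), (1, 0), (-1, 0)] : List (Int × Int))) then []  -- assert, excluded by Pre_
        else
          let candidates : List (Int × Int) := [(s.2, -s.1), (-s.2, s.1)]  -- cw turn, ccw turn
          let turned := candidates.filter (fun d => turns_into tile s d)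
          let straight := if passes tile s then [s] else []
          (turned ++ straight).map (fun d => (pos_row + d.1, pos_col + d.2, d.1, d.2))

-- ===== PRECONDITION & SPEC =====
-- Pre_ excludes exactly the inputs where A raises: out-of-range row/col indices (IndexError)
-- and tiles other than . / L | -, or a non-unit speed at a mirror/splitter tile (AssertionError).
def Pre_simulate_beam (beam : Int × Int × Int × Int) (map : List String) : Prop :=
  (Option.any
    (fun t => (t == '.' || t == '/' || t == 'L' || t == '|' || t == '-') &&
      (t == '.' || decide ((beam.2.2.1, beam.2.2.2) ∈ ([((0 : Int), (1 : Int)), (0, -1), (1, 0), (-1, 0)] : List (Int × Int)))))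
    ((PySem.List.pyGet? map beam.1).bind (fun row => PySem.Str.pyGet? row beam.2.1))) = true
instance (beam : Int × Int × Int × Int) (map : List String) : Decidable (Pre_simulate_beam beam map) := by unfold Pre_simulate_beam; infer_instance
def pvWitness_simulate_beam : (Int × Int × Int × Int) × List String := ((0, 1, 0, 1), ["./|", "-L."])

def Spec_simulate_beam (beam : Int × Int × Int × Int) (map : List String) (out : List (Int × Int × Int × Int)) : Prop := out = simulate_beam_alt beam map
instance (beam : Int × Int × Int × Int) (map : List String) (out : List (Int × Int × Int × Int)) : Decidable (Spec_simulate_beam beam map out) := by unfold Spec_simulate_beam; infer_instance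

-- ===== CLAIM (what is proved, stated in full; the proofs are below) =====
def Claim_equal_simulate_beam : Prop := ∀ (beam : Int × Int × Int × Int) (map : List String), Dom_simulate_beam beam map → Pre_simulate_beam beam map → Spec_simulate_beam beam map (simulate_beam beam map)

-- ===== LEMMAS AND PROOFS =====
theorem simulate_beam_eq_alt (beam : Int × Int × Int × Int) (map : List String)
    (hpre : Pre_simulate_beam beam map) : simulate_beam beam map = simulate_beam_alt beam map := by
  obtain ⟨pr, pc, sr, sc⟩ := beam
  unfold Pre_simulate_beam at hpre
  cases h1 : PySem.List.pyGet? map pr with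
  | none => simp [h1] at hpre
  | some row =>
    rw [h1] at hpre
    rw [show ((some row).bind fun a => PySem.Str.pyGet? a pc) = PySem.Str.pyGet? row pc from rfl] at hpre
    cases h2 : PySem.Str.pyGet? row pc with
    | none => rw [h2] at hpre; simp at hpre
    | some tile =>
      rw [h2] at hpre
      simp only [Option.any_some, Bool.and_eq_true, Bool.or_eq_true,
        beq_iff_eq, decide_eq_true_eq] at hpre
      obtain ⟨htile, hspeed⟩ := hpre
      have h2' : PySem.List.pyGet? row.toList pc = some tile := by simpa using h2
      rcases htile with ((((h | h) | h) | h) | h) <;> subst h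
      · simp [simulate_beam, simulate_beam_alt, h1, h2', turns_into, passes]
      all_goals
        rcases hspeed with h' | hs
        · exact absurd h' (by decide)
        · simp only [List.mem_cons, List.not_mem_nil, or_false, Prod.mk.injEq] at hs
          rcases hs with ⟨rfl, rfl⟩ | ⟨rfl, rfl⟩ | ⟨rfl, rfl⟩ | ⟨rfl, rfl⟩ <;>
            simp [simulate_beam, simulate_beam_alt, reflect_speed, split_speeds,
              turns_into, passes, h1, h2']

-- ===== VERDICT (by name: the statement is the Claim_ definition above) =====
theorem simulate_beam_spec : Claim_equal_simulate_beam := by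
  intro beam map _ hpre
  exact simulate_beam_eq_alt beam map hpre
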